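-- pv_equiv track=rewrite | github.com/jordiSabroson/IA | Models de llenguatge/tokenizer.py | tokenitzar_loop
-- ===== SOURCE A (Python) =====
-- from collections import Counter
--
-- def trobar_sequencies(tokens, longitud, umbral):
--     sequencies = Counter(tuple(tokens[i:i+longitud]) for i in range(len(tokens) - longitud + 1)) # contem quants cops es repeteixen les parelles de tokens
--     frequents = {seq: count for seq, count in sequencies.items() if count >= umbral} # ens quedem amb les sequencies que es repeteixin mes cops que l'umbral indicat
--     return frequents
--
-- def actualitzar_diccionari(diccionari, frequents, index_inici):
--     nou_diccionari = diccionari.copy() # copiem el diccionari actual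
--     nou_index = index_inici
--     for seq in frequents:
--         if seq not in nou_diccionari: # si la sequencia no es troba al diccionari l'afegim
--             nou_diccionari[seq] = nou_index
--             nou_index += 1
--     return nou_diccionari
--
-- def substituir_sequencies(tokens, frequents, diccionari):
--     i = 0
--     resultat = []
--     while i < len(tokens):
--         substituit = False
--         for longitut in range(max(len(seq) for seq in frequents), 0, -1):
--             if i + longitut <= len(tokens):
--                 subsequencia = tuple(tokens[i:i+longitut])
--                 if subsequencia in frequents:
--                     resultat.append(diccionari[subsequencia])
--                     i += longitut
--                     substituit = True
--                     break
--         if not substituit: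
--             resultat.append(tokens[i])
--             i += 1
--     return resultat
--
-- def tokenitzar_loop(tokens, diccionari, num_tokens, longitut=2, umbral=3, index_inici=41):
--     diccionari_actualitzat = diccionari.copy()
--     tokens_actualitzats = tokens
--     index_actual = index_inici
--
--     while len(tokens_actualitzats) > num_tokens:
--         sequencies_frequents = trobar_sequencies(tokens_actualitzats, longitut, umbral)
--
--         if not sequencies_frequents:
--             break
--
--         diccionari_actualitzat = actualitzar_diccionari(diccionari_actualitzat, sequencies_frequents, index_actual)
--
--         tokens_actualitzats = substituir_sequencies(tokens_actualitzats, sequencies_frequents, diccionari_actualitzat)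
--
--         index_actual = max(diccionari_actualitzat.values()) + 1
--
--     return tokens_actualitzats, diccionari_actualitzat
-- ===== SOURCE B (Python) =====
-- def tokenitzar_loop(tokens, diccionari, num_tokens, longitut=2, umbral=3, index_inici=41):
--     dic = dict(diccionari)
--     toks = tokens
--     idx = index_inici
--     while len(toks) > num_tokens:
--         finestres = [tuple(toks[i:i+longitut]) for i in range(len(toks) - longitut + 1)]
--         # sort-then-scan counting: equal windows are adjacent after sorting, so a
--         # running run-length over sorted(finestres) finds every window with >= umbral copies
--         freq = set()
--         run, prev = 0, None
--         for w in sorted(finestres):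
--             run = run + 1 if w == prev else 1
--             prev = w
--             if run >= umbral:
--                 freq.add(w)
--         if not freq:
--             break
--         # register the frequent windows in first-occurrence order with one scan over the windows
--         for w in finestres:
--             if w in freq and w not in dic:
--                 dic[w] = idx
--                 idx += 1
--         # greedy left-to-right replacement: only the one window length can match
--         nou, i = [], 0
--         while i < len(toks):
--             w = tuple(toks[i:i+longitut])
--             if i + longitut <= len(toks) and w in freq:
--                 nou.append(dic[w])
--                 i += longitut
--             else:
--                 nou.append(toks[i])
--                 i += 1
--         toks = nou
--         idx = max(dic.values()) + 1
--     return toks, dic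
-- ===== Notes on version B (the rewrite author's own statement) =====
-- stated objective: alternative
-- what changed: B replaces A's hash-based Counter with sort-then-scan counting (sort the window list, detect frequent windows as runs of length >= umbral while scanning the sorted list), recovers the dict-extension order by a first-occurrence scan over the window list instead of iterating the counts dict, and replaces the nested descending-length search of A's substitution helper by a single greedy forward scan over the one window length. Pre_ excludes longitut <= 1 when len(tokens) > num_tokens, where a round never shortens the token list so A loops forever whenever a frequent sequence exists; …
-- outside the precondition, e.g. on tokenitzar_loop([1, 2, 3], {}, 0, 1, 5, 41): A returns ([1, 2, 3], {}), B returns ([1, 2, 3], {})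
import Mathlib
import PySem

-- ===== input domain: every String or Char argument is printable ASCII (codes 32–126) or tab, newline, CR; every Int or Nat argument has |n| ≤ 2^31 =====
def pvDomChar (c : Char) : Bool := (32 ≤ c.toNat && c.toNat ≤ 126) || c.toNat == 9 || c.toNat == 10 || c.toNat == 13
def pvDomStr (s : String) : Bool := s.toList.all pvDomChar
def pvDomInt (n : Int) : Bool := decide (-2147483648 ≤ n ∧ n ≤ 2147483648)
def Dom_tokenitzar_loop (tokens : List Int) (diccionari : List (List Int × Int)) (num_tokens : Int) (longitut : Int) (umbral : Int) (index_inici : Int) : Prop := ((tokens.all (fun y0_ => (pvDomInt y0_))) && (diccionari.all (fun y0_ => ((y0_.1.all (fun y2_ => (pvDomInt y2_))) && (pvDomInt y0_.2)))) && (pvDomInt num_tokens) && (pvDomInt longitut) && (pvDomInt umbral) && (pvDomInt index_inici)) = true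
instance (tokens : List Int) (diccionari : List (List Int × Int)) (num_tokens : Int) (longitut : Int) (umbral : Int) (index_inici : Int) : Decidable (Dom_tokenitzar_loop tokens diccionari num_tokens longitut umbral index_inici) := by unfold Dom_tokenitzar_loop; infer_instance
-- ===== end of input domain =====

-- B replaces the hash Counter by sort-then-scan counting (runs in the sorted window list), recovers
-- the dict-extension order with a first-occurrence scan over the windows, and replaces the nested
-- descending-length search of A's substitution by one single-length greedy scan (objective: alternative).

-- ===== PORT A =====

-- trobar_sequencies: Counter over all length-`longitud` windows, then the dict comprehension keeping counts ≥ umbral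
def pvTrobarSequencies (tokens : List Int) (longitud : Int) (umbral : Int) : PySem.Dict (List Int) Int :=
  let sequencies := PySem.Dict.counter
    ((PySem.List.pyRange 0 ((tokens.length : Int) - longitud + 1) 1).map
      (fun i => PySem.List.slice tokens (some i) (some (i + longitud))))
  PySem.Dict.mk (sequencies.items.filter (fun p => umbral ≤ p.2))

-- actualitzar_diccionari: for seq in frequents: if seq not in dict, append it with the running index
def pvActualitzarDiccionari (diccionari : PySem.Dict (List Int) Int) (frequents : PySem.Dict (List Int) Int) (index_inici : Int) : PySem.Dict (List Int) Int :=
  (frequents.keys.foldl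
    (fun (st : PySem.Dict (List Int) Int × Int) seq =>
      if st.1.contains seq then st else (st.1.insert seq st.2, st.2 + 1))
    (diccionari, index_inici)).1

-- inner while of substituir_sequencies; the for-loop over range(maxlen, 0, -1) with break is findSome?.
-- Fuel tokens.length + 1 suffices: i advances by ≥ 1 each step (every length drawn from range(maxlen,0,-1) is ≥ 1).
def pvSubstGo (tokens : List Int) (frequents : PySem.Dict (List Int) Int) (diccionari : PySem.Dict (List Int) Int) (maxlen : Int) : Nat → Nat → List Int
  | 0, _ => []
  | fuel + 1, i =>
    if i < tokens.length then
      match (PySem.List.pyRange maxlen 0 (-1)).findSome? (fun longitut =>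
          if (i : Int) + longitut ≤ (tokens.length : Int) then
            if frequents.contains (PySem.List.slice tokens (some (i : Int)) (some ((i : Int) + longitut))) then
              some (longitut, diccionari.getD (PySem.List.slice tokens (some (i : Int)) (some ((i : Int) + longitut))) 0)
            else none
          else none) with
      | some r => r.2 :: pvSubstGo tokens frequents diccionari maxlen fuel (i + r.1.toNat)
      | none => tokens.getD i 0 :: pvSubstGo tokens frequents diccionari maxlen fuel (i + 1)
    else []

def pvSubstituirSequencies (tokens : List Int) (frequents : PySem.Dict (List Int) Int) (diccionari : PySem.Dict (List Int) Int) : List Int :=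
  -- Python's max(len(seq) for seq in frequents) raises on empty frequents; the call site guarantees
  -- frequents nonempty (guarded by the break), so the .getD 0 default is never the Python-raising case.
  let maxlen : Int := (PySem.List.max? (frequents.keys.map (fun s => (s.length : Int))) (fun x => x)).getD 0
  pvSubstGo tokens frequents diccionari maxlen (tokens.length + 1) 0

-- the while-loop of tokenitzar_loop; fuel tokens.length + 1 suffices: every executed round shortens the
-- token list by at least one (under Pre_, i.e. longitut ≥ 2 or zero rounds).
def pvLoopA (num_tokens : Int) (longitut : Int) (umbral : Int) : Nat → List Int → PySem.Dict (List Int) Int → Int → List Int × PySem.Dict (List Int) Int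
  | 0, toks, dic, _ => (toks, dic)
  | fuel + 1, toks, dic, idx =>
    if num_tokens < (toks.length : Int) then
      let frequents := pvTrobarSequencies toks longitut umbral
      if frequents.items.isEmpty then (toks, dic)
      else
        let dic' := pvActualitzarDiccionari dic frequents idx
        let toks' := pvSubstituirSequencies toks frequents dic'
        pvLoopA num_tokens longitut umbral fuel toks' dic'
          (((PySem.List.max? dic'.values (fun x => x)).getD 0) + 1)
    else (toks, dic)

def tokenitzar_loop (tokens : List Int) (diccionari : List (List Int × Int)) (num_tokens : Int) (longitut : Int) (umbral : Int) (index_inici : Int) : List Int × (List (List Int × Int)) :=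
  let r := pvLoopA num_tokens longitut umbral (tokens.length + 1) tokens (PySem.Dict.mk diccionari) index_inici
  (r.1, r.2.items)

-- ===== PORT B =====

-- the window list comprehension of Source B
def pvWindows (toks : List Int) (longitut : Int) : List (List Int) :=
  (PySem.List.pyRange 0 ((toks.length : Int) - longitut + 1) 1).map
    (fun i => PySem.List.slice toks (some i) (some (i + longitut)))

-- sorted(finestres): Python's lexicographic tuple order is the lexicographic order on List Int
def pvSortedB (xs : List (List Int)) : List (List Int) :=
  @PySem.List.sorted (List Int) (List Int) List.instLinearOrder.toLT LinearOrder.toDecidableLT xs (fun x => x) false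

-- one step of the run-length scan over the sorted window list: state (freq set, run, prev)
def pvRunStep (umbral : Int) (st : PySem.Set (List Int) × Int × Option (List Int)) (w : List Int) : PySem.Set (List Int) × Int × Option (List Int) :=
  let run : Int := match st.2.2 with
    | some p => if w = p then st.2.1 + 1 else 1
    | none => 1
  (if umbral ≤ run then PySem.Set.add st.1 w else st.1, run, some w)

def pvFreqB (finestres : List (List Int)) (umbral : Int) : PySem.Set (List Int) :=
  ((pvSortedB finestres).foldl (pvRunStep umbral) (PySem.Set.empty, 0, none)).1

-- one first-occurrence scan over the window list extends the dict
def pvUpdateB (finestres : List (List Int)) (freq : PySem.Set (List Int)) (dic : PySem.Dict (List Int) Int) (idx : Int) : PySem.Dict (List Int) Int × Int :=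
  finestres.foldl
    (fun (st : PySem.Dict (List Int) Int × Int) w =>
      if PySem.Set.contains freq w && ! st.1.contains w then (st.1.insert w st.2, st.2 + 1) else st)
    (dic, idx)

-- the greedy single-length replacement scan of Source B
def pvScanB (toks : List Int) (vistes : PySem.Set (List Int)) (dic : PySem.Dict (List Int) Int) (longitut : Int) : Nat → Nat → List Int
  | 0, _ => []
  | fuel + 1, i =>
    if i < toks.length then
      if decide ((i : Int) + longitut ≤ (toks.length : Int)) &&
         PySem.Set.contains vistes (PySem.List.slice toks (some (i : Int)) (some ((i : Int) + longitut))) then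
        dic.getD (PySem.List.slice toks (some (i : Int)) (some ((i : Int) + longitut))) 0
          :: pvScanB toks vistes dic longitut fuel (i + longitut.toNat)
      else
        toks.getD i 0 :: pvScanB toks vistes dic longitut fuel (i + 1)
    else []

def pvRoundsB (num_tokens : Int) (longitut : Int) (umbral : Int) : Nat → List Int → PySem.Dict (List Int) Int → Int → List Int × PySem.Dict (List Int) Int
  | 0, toks, dic, _ => (toks, dic)
  | fuel + 1, toks, dic, idx =>
    if num_tokens < (toks.length : Int) then
      let finestres := pvWindows toks longitut
      let freq := pvFreqB finestres umbral
      if freq.isEmpty then (toks, dic)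
      else
        let st := pvUpdateB finestres freq dic idx
        let toks' := pvScanB toks freq st.1 longitut (toks.length + 1) 0
        pvRoundsB num_tokens longitut umbral fuel toks' st.1
          (((PySem.List.max? st.1.values (fun x => x)).getD 0) + 1)
    else (toks, dic)

def tokenitzar_loop_alt (tokens : List Int) (diccionari : List (List Int × Int)) (num_tokens : Int) (longitut : Int) (umbral : Int) (index_inici : Int) : List Int × (List (List Int × Int)) :=
  let r := pvRoundsB num_tokens longitut umbral (tokens.length + 1) tokens (PySem.Dict.mk diccionari) index_inici
  (r.1, r.2.items)

-- ===== PRECONDITION & SPEC =====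
-- Pre_ excludes longitut ≤ 1 together with len(tokens) > num_tokens: there a round never shortens the
-- token list, so A diverges whenever a frequent sequence exists; on the remaining inputs of that region
-- A returns (the first round finds no frequent sequence and breaks) and B returns the same value.
def Pre_tokenitzar_loop (tokens : List Int) (diccionari : List (List Int × Int)) (num_tokens : Int) (longitut : Int) (umbral : Int) (index_inici : Int) : Prop :=
  2 ≤ longitut ∨ (tokens.length : Int) ≤ num_tokens
instance (tokens : List Int) (diccionari : List (List Int × Int)) (num_tokens : Int) (longitut : Int) (umbral : Int) (index_inici : Int) : Decidable (Pre_tokenitzar_loop tokens diccionari num_tokens longitut umbral index_inici) := by unfold Pre_tokenitzar_loop; infer_instance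

def pvWitness_tokenitzar_loop : List Int × (List (List Int × Int)) × Int × Int × Int × Int :=
  ([1, 2, 1, 2, 1, 2, 1, 2], [], 3, 2, 3, 41)

def Spec_tokenitzar_loop (tokens : List Int) (diccionari : List (List Int × Int)) (num_tokens : Int) (longitut : Int) (umbral : Int) (index_inici : Int) (out : List Int × (List (List Int × Int))) : Prop := out = tokenitzar_loop_alt tokens diccionari num_tokens longitut umbral index_inici
instance (tokens : List Int) (diccionari : List (List Int × Int)) (num_tokens : Int) (longitut : Int) (umbral : Int) (index_inici : Int) (out : List Int × (List (List Int × Int))) : Decidable (Spec_tokenitzar_loop tokens diccionari num_tokens longitut umbral index_inici out) := by unfold Spec_tokenitzar_loop; infer_instance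

-- ===== CLAIM (what is proved, stated in full; the proofs are below) =====
def Claim_equal_tokenitzar_loop : Prop := ∀ (tokens : List Int) (diccionari : List (List Int × Int)) (num_tokens : Int) (longitut : Int) (umbral : Int) (index_inici : Int), Dom_tokenitzar_loop tokens diccionari num_tokens longitut umbral index_inici → Pre_tokenitzar_loop tokens diccionari num_tokens longitut umbral index_inici → Spec_tokenitzar_loop tokens diccionari num_tokens longitut umbral index_inici (tokenitzar_loop tokens diccionari num_tokens longitut umbral index_inici)

-- ===== LEMMAS AND PROOFS =====

-- Bool form of (· ≠ y), named so rewrite lemmas about filters unify cleanly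
def pvNe (y z : List Int) : Bool := decide ¬(z = y)

-- A's per-key step of actualitzar_diccionari, named for the dedup lemmas below
def pvAStep (st : PySem.Dict (List Int) Int × Int) (w : List Int) : PySem.Dict (List Int) Int × Int :=
  if st.1.contains w then st else (st.1.insert w st.2, st.2 + 1)

-- length of the slice tokens[i:i+L] when 0 ≤ i, 0 ≤ L and i+L ≤ len
theorem pvSliceLen (toks : List Int) (i L : Int) (h0 : 0 ≤ i) (hL : 0 ≤ L)
    (hle : i + L ≤ (toks.length : Int)) :
    (PySem.List.slice toks (some i) (some (i + L))).length = L.toNat := by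
  rw [PySem.List.slice_toNat toks h0 (by omega)]
  simp only [List.length_take, List.length_drop]
  omega

-- every frequent key is a full window, hence has length exactly longitut
theorem pvFreqLen (toks : List Int) (longitut umbral : Int) (hL : 1 ≤ longitut) (s : List Int)
    (hs : s ∈ ((PySem.Dict.counter (pvWindows toks longitut)).items.filter
        (fun p => umbral ≤ p.2)).map (fun p => p.1)) :
    s.length = longitut.toNat := by
  rcases List.mem_map.mp hs with ⟨q, hq, rfl⟩
  have hq' := List.mem_of_mem_filter hq
  rw [PySem.Dict.items_counter] at hq'
  rcases List.mem_map.mp hq' with ⟨k, hk, rfl⟩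
  have hkmem : k ∈ pvWindows toks longitut := (PySem.Set.mem_ofList _ _).mp hk
  rcases List.mem_map.mp hkmem with ⟨i, hi, rfl⟩
  rw [PySem.List.mem_pyRange_one] at hi
  exact pvSliceLen toks i longitut hi.1 (by omega) (by omega)

-- A's descending-length search collapses to the single length-`longitut` test
theorem pvFindChar (toks : List Int) (freqD dic : PySem.Dict (List Int) Int) (longitut : Int) (i : Nat)
    (hL : 1 ≤ longitut)
    (hkeys : ∀ s ∈ freqD.keys, s.length = longitut.toNat) :
    ((PySem.List.pyRange longitut 0 (-1)).findSome? (fun L =>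
        if (i : Int) + L ≤ (toks.length : Int) then
          if freqD.contains (PySem.List.slice toks (some (i : Int)) (some ((i : Int) + L))) then
            some (L, dic.getD (PySem.List.slice toks (some (i : Int)) (some ((i : Int) + L))) 0)
          else none
        else none))
    = (if decide ((i : Int) + longitut ≤ (toks.length : Int)) &&
          freqD.contains (PySem.List.slice toks (some (i : Int)) (some ((i : Int) + longitut))) then
        some (longitut, dic.getD (PySem.List.slice toks (some (i : Int)) (some ((i : Int) + longitut))) 0)
      else none) := by
  have hrest : (PySem.List.pyRange (longitut - 1) 0 (-1)).findSome? (fun L =>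
      if (i : Int) + L ≤ (toks.length : Int) then
        if freqD.contains (PySem.List.slice toks (some (i : Int)) (some ((i : Int) + L))) then
          some (L, dic.getD (PySem.List.slice toks (some (i : Int)) (some ((i : Int) + L))) 0)
        else none
      else none) = none := by
    rw [List.findSome?_eq_none_iff]
    intro L hLmem
    rw [PySem.List.mem_pyRange_neg_one] at hLmem
    by_cases hle : (i : Int) + L ≤ (toks.length : Int)
    · have hlen : (PySem.List.slice toks (some (i : Int)) (some ((i : Int) + L))).length = L.toNat :=
        pvSliceLen toks i L (by omega) (by omega) hle
      have hcon : freqD.contains (PySem.List.slice toks (some (i : Int)) (some ((i : Int) + L))) = false := by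
        by_contra hcc
        have : freqD.contains (PySem.List.slice toks (some (i : Int)) (some ((i : Int) + L))) = true := by
          revert hcc; cases freqD.contains (PySem.List.slice toks (some (i : Int)) (some ((i : Int) + L))) <;> simp
        have hmem := (PySem.Dict.contains_iff_mem_keys _ _).mp this
        have := hkeys _ hmem
        omega
      simp [hle, hcon]
    · simp [hle]
  rw [PySem.List.pyRange_neg_one_cons (by omega : (0 : Int) < longitut), List.findSome?_cons]
  by_cases h1 : (i : Int) + longitut ≤ (toks.length : Int)
  · cases hc : freqD.contains (PySem.List.slice toks (some (i : Int)) (some ((i : Int) + longitut))) with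
    | true => simp [h1]
    | false => simp [h1, hrest]
  · simp [h1, hrest]

-- the two substitution scans agree step by step
theorem pvScanEq (toks : List Int) (freqD dic : PySem.Dict (List Int) Int) (longitut : Int)
    (S : PySem.Set (List Int)) (hmem : ∀ s, freqD.contains s = PySem.Set.contains S s)
    (hL : 1 ≤ longitut)
    (hkeys : ∀ s ∈ freqD.keys, s.length = longitut.toNat) :
    ∀ fuel i, pvSubstGo toks freqD dic longitut fuel i
      = pvScanB toks S dic longitut fuel i := by
  intro fuel
  induction fuel with
  | zero => intro i; rfl
  | succ n ih =>
    intro i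
    simp only [pvSubstGo, pvScanB]
    by_cases hi : i < toks.length
    · rw [if_pos hi, if_pos hi, pvFindChar toks freqD dic longitut i hL hkeys, ← hmem]
      by_cases hcc : (decide ((i : Int) + longitut ≤ (toks.length : Int)) &&
          freqD.contains (PySem.List.slice toks (some (i : Int)) (some ((i : Int) + longitut)))) = true
      · simp only [if_pos hcc]
        exact congrArg _ (ih _)
      · simp only [if_neg hcc]
        exact congrArg _ (ih _)
    · rw [if_neg hi, if_neg hi]

-- a nonempty constant list has that constant as its max
theorem pvMaxConst (l : List Int) (c : Int) (hne : l ≠ []) (hall : ∀ x ∈ l, x = c) :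
    (PySem.List.max? l (fun x => x)).getD 0 = c := by
  cases h : PySem.List.max? l (fun x => x) with
  | none => exact absurd ((PySem.List.max?_eq_none_iff l _).mp h) hne
  | some m => simpa using hall m (PySem.List.max?_mem h)

-- run-length scan over any list in which equal elements are contiguous: membership = count ≥ umbral
theorem pvRunFold_some (umbral : Int) (w : List Int) (R : List Int → List Int → Prop)
    (hanti : ∀ a b, R a b → R b a → a = b) :
    ∀ (ls : List (List Int)), ls.Pairwise R → ∀ (p : List Int), (∀ x ∈ ls, R p x) →
    ∀ (s : PySem.Set (List Int)) (run : Int),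
    (w ∈ (ls.foldl (pvRunStep umbral) (s, run, some p)).1 ↔
      w ∈ s ∨ (w = p ∧ 0 < List.count p ls ∧ umbral ≤ run + List.count p ls)
            ∨ (w ≠ p ∧ w ∈ ls ∧ umbral ≤ (List.count w ls : Int))) := by
  intro ls
  induction ls with
  | nil => intro _ p _ s run; simp
  | cons x t ih =>
    intro hpair p hp s run
    obtain ⟨hxt, hpt⟩ := List.pairwise_cons.mp hpair
    rw [List.foldl_cons]
    by_cases hxp : x = p
    · subst hxp
      have h1 : pvRunStep umbral (s, run, some x) x
          = (if umbral ≤ run + 1 then PySem.Set.add s x else s, run + 1, some x) := by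
        simp [pvRunStep]
      rw [h1, ih hpt x hxt _ (run + 1)]
      by_cases hw : w = x
      · subst hw
        have hca : List.count w (w :: t) = List.count w t + 1 := by simp
        rw [hca]
        by_cases hrun : umbral ≤ run + 1
        · rw [if_pos hrun]
          constructor
          · rintro (h | ⟨_, h2, h3⟩ | ⟨h1, _, _⟩)
            · rcases (PySem.Set.mem_add s w w).mp h with h' | _
              · exact Or.inl h'
              · exact Or.inr (Or.inl ⟨rfl, by omega, by omega⟩)
            · exact Or.inr (Or.inl ⟨rfl, by omega, by omega⟩)
            · exact absurd rfl h1
          · intro _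
            exact Or.inl ((PySem.Set.mem_add s w w).mpr (Or.inr rfl))
        · rw [if_neg hrun]
          constructor
          · rintro (h | ⟨_, h2, h3⟩ | ⟨h1, _, _⟩)
            · exact Or.inl h
            · exact Or.inr (Or.inl ⟨rfl, by omega, by omega⟩)
            · exact absurd rfl h1
          · rintro (h | ⟨_, h2, h3⟩ | ⟨h1, _, _⟩)
            · exact Or.inl h
            · exact Or.inr (Or.inl ⟨rfl, by omega, by omega⟩)
            · exact absurd rfl h1
      · have hwx : (x == w) = false := beq_eq_false_iff_ne.mpr (Ne.symm hw)
        by_cases hrun : umbral ≤ run + 1 <;>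
          simp [hrun, hw, PySem.Set.mem_add, List.count_cons, hwx]
    · have hpx : R p x := hp x (List.mem_cons_self ..)
      have hpnt : p ∉ t := fun hmem => hxp (hanti x p (hxt p hmem) hpx)
      have h1 : pvRunStep umbral (s, run, some p) x
          = (if umbral ≤ 1 then PySem.Set.add s x else s, 1, some x) := by
        simp [pvRunStep, hxp]
      rw [h1, ih hpt x hxt _ 1]
      have hcpc : List.count p (x :: t) = 0 :=
        List.count_eq_zero.mpr (by
          intro hmem
          rcases List.mem_cons.mp hmem with h | h
          · exact hxp h.symm
          · exact hpnt h)
      rw [hcpc]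
      by_cases hw : w = x
      · subst hw
        have hwp : w ≠ p := hxp
        have hca : List.count w (w :: t) = List.count w t + 1 := by simp
        rw [hca]
        by_cases hrun : umbral ≤ 1
        · rw [if_pos hrun]
          constructor
          · intro _
            exact Or.inr (Or.inr ⟨hwp, List.mem_cons_self .., by omega⟩)
          · intro _
            exact Or.inl ((PySem.Set.mem_add s w w).mpr (Or.inr rfl))
        · rw [if_neg hrun]
          constructor
          · rintro (h | ⟨_, h2, h3⟩ | ⟨h1, _, _⟩)
            · exact Or.inl h
            · exact Or.inr (Or.inr ⟨hwp, List.mem_cons_self .., by omega⟩)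
            · exact absurd rfl h1
          · rintro (h | ⟨_, h2, _⟩ | ⟨_, _, h3⟩)
            · exact Or.inl h
            · exact absurd h2 (lt_irrefl 0)
            · exact Or.inr (Or.inl ⟨rfl, by omega, by omega⟩)
      · have hwx : (x == w) = false := beq_eq_false_iff_ne.mpr (Ne.symm hw)
        have hcw : List.count w (x :: t) = List.count w t := by simp [List.count_cons, hwx]
        rw [hcw]
        have hmemt : w ∈ t → w ≠ p := fun hmem h => hpnt (h ▸ hmem)
        have hms : w ∈ (if umbral ≤ 1 then PySem.Set.add s x else s) ↔ w ∈ s := by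
          by_cases hrun : umbral ≤ 1 <;> simp [hrun, PySem.Set.mem_add, hw]
        rw [hms]
        constructor
        · rintro (h | ⟨h1, _, _⟩ | ⟨_, h2, h3⟩)
          · exact Or.inl h
          · exact absurd h1 hw
          · exact Or.inr (Or.inr ⟨hmemt h2, List.mem_cons_of_mem x h2, h3⟩)
        · rintro (h | ⟨_, h2, _⟩ | ⟨h1, h2, h3⟩)
          · exact Or.inl h
          · exact absurd h2 (lt_irrefl 0)
          · rcases List.mem_cons.mp h2 with h' | h'
            · exact absurd h' hw
            · exact Or.inr (Or.inr ⟨hw, h', h3⟩)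

theorem pvRunFold_none (umbral : Int) (w : List Int) (R : List Int → List Int → Prop)
    (hanti : ∀ a b, R a b → R b a → a = b) (ls : List (List Int))
    (hpair : ls.Pairwise R) :
    (w ∈ (ls.foldl (pvRunStep umbral) (PySem.Set.empty, 0, none)).1 ↔
      w ∈ ls ∧ umbral ≤ (List.count w ls : Int)) := by
  cases ls with
  | nil => simp [PySem.Set.empty]
  | cons x t =>
    obtain ⟨hxt, hpt⟩ := List.pairwise_cons.mp hpair
    rw [List.foldl_cons]
    have h1 : pvRunStep umbral (PySem.Set.empty, 0, none) x
        = (if umbral ≤ 1 then PySem.Set.add PySem.Set.empty x else PySem.Set.empty, 1, some x) := by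
      simp [pvRunStep]
    rw [h1, pvRunFold_some umbral w R hanti t hpt x hxt _ 1]
    have hme : w ∈ (PySem.Set.empty : PySem.Set (List Int)) ↔ False := by
      simp [PySem.Set.empty]
    by_cases hw : w = x
    · subst hw
      have hca : List.count w (w :: t) = List.count w t + 1 := by simp
      rw [hca]
      by_cases hrun : umbral ≤ 1
      · rw [if_pos hrun]
        constructor
        · intro _
          exact ⟨List.mem_cons_self .., by omega⟩
        · intro _
          exact Or.inl ((PySem.Set.mem_add _ w w).mpr (Or.inr rfl))
      · rw [if_neg hrun]
        constructor
        · rintro (h | ⟨_, h2, h3⟩ | ⟨h1, _, _⟩)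
          · exact (hme.mp h).elim
          · exact ⟨List.mem_cons_self .., by omega⟩
          · exact absurd rfl h1
        · rintro ⟨_, h3⟩
          exact Or.inr (Or.inl ⟨rfl, by omega, by omega⟩)
    · have hwx : (x == w) = false := beq_eq_false_iff_ne.mpr (Ne.symm hw)
      have hcw : List.count w (x :: t) = List.count w t := by simp [List.count_cons, hwx]
      rw [hcw]
      have hms : w ∈ (if umbral ≤ 1 then PySem.Set.add PySem.Set.empty x else PySem.Set.empty) ↔ False := by
        by_cases hrun : umbral ≤ 1 <;> simp [hrun, hw, PySem.Set.empty]
      rw [hms]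
      constructor
      · rintro (h | ⟨h1, _, _⟩ | ⟨_, h2, h3⟩)
        · exact absurd h id
        · exact absurd h1 hw
        · exact ⟨List.mem_cons_of_mem x h2, h3⟩
      · rintro ⟨h2, h3⟩
        rcases List.mem_cons.mp h2 with h' | h'
        · exact absurd h' hw
        · exact Or.inr (Or.inr ⟨hw, h', h3⟩)

-- membership in B's frequent set is exactly "window with count ≥ umbral"
theorem mem_pvFreqB (xs : List (List Int)) (umbral : Int) (w : List Int) :
    w ∈ pvFreqB xs umbral ↔ w ∈ xs ∧ umbral ≤ (List.count w xs : Int) := by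
  have hperm : (pvSortedB xs).Perm xs :=
    @PySem.List.sorted_perm (List Int) (List Int) List.instLinearOrder.toLT
      LinearOrder.toDecidableLT xs (fun x => x) false
  have hpair : (pvSortedB xs).Pairwise (fun a b : List Int => a ≤ b) :=
    PySem.List.sorted_pairwise xs (fun x => x)
  unfold pvFreqB
  rw [pvRunFold_none umbral w (fun a b : List Int => a ≤ b)
      (fun a b h1 h2 => le_antisymm h1 h2) _ hpair,
    hperm.mem_iff, hperm.count_eq]

-- A's frequents key list is the ordered dedup of the windows filtered by the count condition
theorem pvAkeys (xs : List (List Int)) (umbral : Int) :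
    ((PySem.Dict.counter xs).items.filter (fun p => umbral ≤ p.2)).map (fun p => p.1)
      = (PySem.Set.ofList xs).filter (fun k => decide (umbral ≤ (List.count k xs : Int))) := by
  rw [PySem.Dict.items_counter, List.filter_map, List.map_map]
  simp [Function.comp_def]

-- A's frequents dict has the same membership test as B's frequent set
theorem pvContainsAfreq (xs : List (List Int)) (umbral : Int) (s : List Int) :
    (PySem.Dict.mk ((PySem.Dict.counter xs).items.filter (fun p => umbral ≤ p.2))).contains s
      = PySem.Set.contains (pvFreqB xs umbral) s := by
  rw [Bool.eq_iff_iff, PySem.Dict.contains_iff_mem_keys, PySem.Set.contains_iff,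
    mem_pvFreqB, PySem.Dict.keys_mk, pvAkeys]
  simp [List.mem_filter, PySem.Set.mem_ofList]

-- Set.ofList commutes with filter
theorem pvOfListFilter (q : List Int → Bool) (xs : List (List Int)) :
    PySem.Set.ofList (xs.filter q) = (PySem.Set.ofList xs).filter q := by
  have haux : ∀ (ys : List (List Int)) (acc : PySem.Set (List Int)),
      (ys.foldl PySem.Set.add acc).filter q = (ys.filter q).foldl PySem.Set.add (acc.filter q) := by
    intro ys
    induction ys with
    | nil => intro acc; rfl
    | cons x t ih =>
      intro acc
      rw [List.foldl_cons, ih (PySem.Set.add acc x)]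
      cases hq : q x with
      | true =>
        rw [List.filter_cons_of_pos hq, List.foldl_cons]
        have hstep : (PySem.Set.add acc x).filter q = PySem.Set.add (acc.filter q) x := by
          by_cases hc : x ∈ acc
          · have h2 : x ∈ acc.filter q := List.mem_filter.mpr ⟨hc, hq⟩
            simp [PySem.Set.add, hc, h2]
          · have h2 : x ∉ acc.filter q := fun hm => hc (List.mem_filter.mp hm).1
            simp [PySem.Set.add, hc, h2, List.filter_append, hq]
        rw [hstep]
      | false =>
        rw [List.filter_cons_of_neg (by simp [hq])]
        have hstep : (PySem.Set.add acc x).filter q = acc.filter q := by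
          by_cases hc : x ∈ acc
          · simp [PySem.Set.add, hc]
          · simp [PySem.Set.add, hc, List.filter_append, hq]
        rw [hstep]
  rw [PySem.Set.ofList_eq_foldl, PySem.Set.ofList_eq_foldl, haux xs []]
  rfl

-- Set.ofList peels its head together with all its duplicates
theorem pvOfListCons (y : List Int) (t : List (List Int)) :
    PySem.Set.ofList (y :: t) = y :: PySem.Set.ofList (t.filter (pvNe y)) := by
  have haux : ∀ (u : List (List Int)) (acc : PySem.Set (List Int)),
      u.foldl PySem.Set.add (y :: acc)
        = y :: (u.filter (pvNe y)).foldl PySem.Set.add acc := by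
    intro u
    induction u with
    | nil => intro acc; rfl
    | cons z u ih =>
      intro acc
      by_cases hz : z = y
      · subst hz
        have h1 : PySem.Set.add (z :: acc) z = z :: acc := by
          simp [PySem.Set.add]
        rw [List.foldl_cons, h1, List.filter_cons_of_neg (by simp [pvNe]), ih acc]
      · have hfz : (pvNe y) z = true := by simp [pvNe, hz]
        rw [List.foldl_cons, List.filter_cons_of_pos hfz, List.foldl_cons]
        by_cases hm : z ∈ acc
        · have h1 : PySem.Set.add (y :: acc) z = y :: acc := by
            simp [PySem.Set.add, hm]
          have h2 : PySem.Set.add acc z = acc := by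
            simp [PySem.Set.add, hm]
          rw [h1, h2, ih acc]
        · have h1 : PySem.Set.add (y :: acc) z = y :: (acc ++ [z]) := by
            simp [PySem.Set.add, hz, hm]
          have h2 : PySem.Set.add acc z = acc ++ [z] := by
            simp [PySem.Set.add, hm]
          rw [h1, h2, ih (acc ++ [z])]
  have h0 : PySem.Set.add ([] : PySem.Set (List Int)) y = [y] := by
    simp [PySem.Set.add]
  rw [PySem.Set.ofList_eq_foldl, List.foldl_cons, h0, PySem.Set.ofList_eq_foldl]
  exact haux t []

-- once a key is present, its later duplicates are no-ops for A's update step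
theorem pvAStepSkip (y : List Int) :
    ∀ (t : List (List Int)) (init : PySem.Dict (List Int) Int × Int),
      init.1.contains y = true →
      t.foldl pvAStep init = (t.filter (pvNe y)).foldl pvAStep init := by
  intro t
  induction t with
  | nil => intro _ _; rfl
  | cons z t ih =>
    intro init h
    by_cases hz : z = y
    · subst hz
      have h1 : pvAStep init z = init := by simp [pvAStep, h]
      rw [List.foldl_cons, h1, List.filter_cons_of_neg (by simp [pvNe]), ih init h]
    · have hfz : (pvNe y) z = true := by simp [pvNe, hz]
      rw [List.foldl_cons, List.filter_cons_of_pos hfz, List.foldl_cons]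
      apply ih
      unfold pvAStep
      by_cases hc : init.1.contains z = true
      · simp [hc, h]
      · simp [hc, PySem.Dict.contains_insert, h]

-- folding A's update step over a list or over its ordered dedup is the same
theorem pvAStepDedup :
    ∀ (n : Nat) (ys : List (List Int)), ys.length ≤ n → ∀ (init : PySem.Dict (List Int) Int × Int),
      ys.foldl pvAStep init = (PySem.Set.ofList ys).foldl pvAStep init := by
  intro n
  induction n with
  | zero =>
    intro ys hlen init
    have h : ys = [] := List.eq_nil_of_length_eq_zero (Nat.le_zero.mp hlen)
    subst h; rfl
  | succ n ih =>
    intro ys hlen init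
    cases ys with
    | nil => rfl
    | cons y t =>
      rw [pvOfListCons, List.foldl_cons, List.foldl_cons]
      have hcy : (pvAStep init y).1.contains y = true := by
        unfold pvAStep
        by_cases hc : init.1.contains y = true
        · simp [hc]
        · simp [hc, PySem.Dict.contains_insert]
      rw [pvAStepSkip y t (pvAStep init y) hcy]
      apply ih
      have hfl := List.length_filter_le (pvNe y) t
      simp only [List.length_cons] at hlen
      omega

-- the two dictionary updates agree
theorem pvUpdateEq (xs : List (List Int)) (umbral : Int) (dic : PySem.Dict (List Int) Int) (idx : Int) :
    (pvUpdateB xs (pvFreqB xs umbral) dic idx).1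
      = pvActualitzarDiccionari dic (PySem.Dict.mk ((PySem.Dict.counter xs).items.filter (fun p => umbral ≤ p.2))) idx := by
  unfold pvUpdateB pvActualitzarDiccionari
  have hA : (fun (st : PySem.Dict (List Int) Int × Int) seq =>
      if st.1.contains seq then st else (st.1.insert seq st.2, st.2 + 1)) = pvAStep := rfl
  rw [hA]
  have hkeys : (PySem.Dict.mk ((PySem.Dict.counter xs).items.filter (fun p => umbral ≤ p.2))).keys
      = (PySem.Set.ofList xs).filter (fun k => decide (umbral ≤ (List.count k xs : Int))) := by
    rw [PySem.Dict.keys_mk]; exact pvAkeys xs umbral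
  rw [hkeys]
  have hcongr : xs.foldl (fun (st : PySem.Dict (List Int) Int × Int) w =>
        if PySem.Set.contains (pvFreqB xs umbral) w && ! st.1.contains w
        then (st.1.insert w st.2, st.2 + 1) else st) (dic, idx)
      = xs.foldl (fun st w => if umbral ≤ (List.count w xs : Int) then pvAStep st w else st) (dic, idx) := by
    apply PySem.List.foldl_congr_mem
    intro acc x hx
    have hfq : PySem.Set.contains (pvFreqB xs umbral) x = decide (umbral ≤ (List.count x xs : Int)) := by
      by_cases hcnt : umbral ≤ (List.count x xs : Int)
      · rw [decide_eq_true hcnt]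
        exact (PySem.Set.contains_iff _ x).mpr ((mem_pvFreqB xs umbral x).mpr ⟨hx, hcnt⟩)
      · rw [decide_eq_false hcnt, ← Bool.not_eq_true, PySem.Set.contains_iff]
        exact fun hm => hcnt ((mem_pvFreqB xs umbral x).mp hm).2
    rw [hfq]
    by_cases hcnt : umbral ≤ (List.count x xs : Int)
    · rw [decide_eq_true hcnt, if_pos hcnt, Bool.true_and]
      unfold pvAStep
      by_cases hc : acc.1.contains x = true <;> simp [hc]
    · rw [decide_eq_false hcnt, if_neg hcnt, Bool.false_and, if_neg (by simp)]
  rw [hcongr,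
    PySem.List.foldl_ite_eq_foldl_filter (fun w => umbral ≤ (List.count w xs : Int)) pvAStep xs (dic, idx),
    pvAStepDedup (xs.filter (fun w => decide (umbral ≤ (List.count w xs : Int)))).length _ le_rfl,
    pvOfListFilter]

-- the two emptiness tests agree
theorem pvEmptyEq (xs : List (List Int)) (umbral : Int) :
    ((PySem.Dict.counter xs).items.filter (fun p => umbral ≤ p.2)).isEmpty
      = (pvFreqB xs umbral).isEmpty := by
  rw [Bool.eq_iff_iff, List.isEmpty_iff, List.isEmpty_iff]
  constructor
  · intro h
    rcases hne : pvFreqB xs umbral with _ | ⟨w, rest⟩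
    · rfl
    · exfalso
      have hw : w ∈ pvFreqB xs umbral := by rw [hne]; exact List.mem_cons_self ..
      obtain ⟨hwx, hcnt⟩ := (mem_pvFreqB xs umbral w).mp hw
      have hmemitems : (w, (List.count w xs : Int)) ∈ (PySem.Dict.counter xs).items := by
        rw [PySem.Dict.items_counter]
        exact List.mem_map.mpr ⟨w, (PySem.Set.mem_ofList xs w).mpr hwx, rfl⟩
      have hmemf : (w, (List.count w xs : Int))
          ∈ (PySem.Dict.counter xs).items.filter (fun p => umbral ≤ p.2) :=
        List.mem_filter.mpr ⟨hmemitems, by simpa using hcnt⟩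
      rw [h] at hmemf
      simp at hmemf
  · intro h
    rw [List.eq_nil_iff_forall_not_mem]
    intro p hp
    obtain ⟨hpi, hple⟩ := List.mem_filter.mp hp
    rw [PySem.Dict.items_counter] at hpi
    obtain ⟨k, hk, rfl⟩ := List.mem_map.mp hpi
    have hmemf : k ∈ pvFreqB xs umbral :=
      (mem_pvFreqB xs umbral k).mpr ⟨(PySem.Set.mem_ofList xs k).mp hk, by simpa using hple⟩
    rw [h] at hmemf
    simp at hmemf

-- the two round loops agree for any fuel when longitut ≥ 2
theorem pvLoopEq (num_tokens longitut umbral : Int) (hL2 : 2 ≤ longitut) :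
    ∀ fuel toks dic idx, pvLoopA num_tokens longitut umbral fuel toks dic idx
      = pvRoundsB num_tokens longitut umbral fuel toks dic idx := by
  intro fuel
  induction fuel with
  | zero => intros; rfl
  | succ n ih =>
    intro toks dic idx
    simp only [pvLoopA, pvRoundsB, pvTrobarSequencies]
    by_cases hc : num_tokens < (toks.length : Int)
    · rw [if_pos hc, if_pos hc]
      have hwin : ((PySem.List.pyRange 0 ((toks.length : Int) - longitut + 1) 1).map
          (fun i => PySem.List.slice toks (some i) (some (i + longitut)))) = pvWindows toks longitut := rfl
      rw [hwin]
      rw [pvEmptyEq (pvWindows toks longitut) umbral]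
      by_cases hemp : (pvFreqB (pvWindows toks longitut) umbral).isEmpty = true
      · rw [if_pos hemp, if_pos hemp]
      · rw [if_neg hemp, if_neg hemp]
        have hkeys : ∀ s ∈ (PySem.Dict.mk ((PySem.Dict.counter (pvWindows toks longitut)).items.filter
            (fun p => umbral ≤ p.2))).keys, s.length = longitut.toNat := by
          intro s hs
          rw [PySem.Dict.keys_mk] at hs
          exact pvFreqLen toks longitut umbral (by omega) s hs
        have hfne : (PySem.Dict.counter (pvWindows toks longitut)).items.filter
            (fun p => umbral ≤ p.2) ≠ [] := by
          intro hnil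
          apply hemp
          rw [← pvEmptyEq (pvWindows toks longitut) umbral, hnil]
          rfl
        have hkne : (PySem.Dict.mk ((PySem.Dict.counter (pvWindows toks longitut)).items.filter
            (fun p => umbral ≤ p.2))).keys ≠ [] := by
          rw [PySem.Dict.keys_mk]
          intro hnil
          exact hfne (List.map_eq_nil_iff.mp hnil)
        have hmax : (PySem.List.max? ((PySem.Dict.mk ((PySem.Dict.counter (pvWindows toks longitut)).items.filter
              (fun p => umbral ≤ p.2))).keys.map (fun s => (s.length : Int))) (fun x => x)).getD 0 = longitut := by
          apply pvMaxConst
          · intro hnil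
            exact hkne (List.map_eq_nil_iff.mp hnil)
          · intro x hx
            rcases List.mem_map.mp hx with ⟨s, hs, rfl⟩
            rw [hkeys s hs]
            omega
        rw [← pvUpdateEq (pvWindows toks longitut) umbral dic idx]
        simp only [pvSubstituirSequencies]
        rw [hmax,
          pvScanEq toks _ _ longitut (pvFreqB (pvWindows toks longitut) umbral)
            (pvContainsAfreq (pvWindows toks longitut) umbral) (by omega) hkeys]
        exact ih _ _ _
    · rw [if_neg hc, if_neg hc]

-- ===== VERDICT (by name: the statement is the Claim_ definition above) =====
theorem tokenitzar_loop_spec : Claim_equal_tokenitzar_loop := by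
  intro tokens diccionari num_tokens longitut umbral index_inici _ hpre
  unfold Spec_tokenitzar_loop tokenitzar_loop tokenitzar_loop_alt
  rcases hpre with hL2 | hle
  · rw [pvLoopEq num_tokens longitut umbral hL2]
  · have h : ¬ num_tokens < (tokens.length : Int) := by omega
    simp only [pvLoopA, pvRoundsB, if_neg h]
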